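-- pv_equiv track=rewrite | github.com/Roha-Lee/sw_jungle_week_02 | jongho_lee/2493.py | received_tower_index
-- ===== SOURCE A (Python) =====
-- def received_tower_index(towers, n):
--     results = [0] * n
--     stack = []
--     for i in range(len(towers)-1, -1, -1):
--         stack.append((i, towers.pop()))
--         while towers and stack and towers[-1] >= stack[-1][1]:
--             idx, _ = stack.pop()
--             results[idx] = i
--     return results
-- ===== SOURCE B (Python) =====
-- def received_tower_index(towers, n):
--     results = [0] * n
--     stack = []
--     for i, h in enumerate(towers):
--         while stack and stack[-1][1] < h:
--             stack.pop()
--         if stack: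
--             results[i] = stack[-1][0]
--         stack.append((i + 1, h))
--     return results
-- ===== Notes on version B (the rewrite author's own statement) =====
-- stated objective: idiomatic
-- what changed: A's right-to-left destructive scan (popping the input list and back-filling receivers from a pending stack) is replaced by the standard left-to-right monotonic-decreasing stack that reads each tower once, assigns its receiver immediately, and does not mutate the input.
import Mathlib
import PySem

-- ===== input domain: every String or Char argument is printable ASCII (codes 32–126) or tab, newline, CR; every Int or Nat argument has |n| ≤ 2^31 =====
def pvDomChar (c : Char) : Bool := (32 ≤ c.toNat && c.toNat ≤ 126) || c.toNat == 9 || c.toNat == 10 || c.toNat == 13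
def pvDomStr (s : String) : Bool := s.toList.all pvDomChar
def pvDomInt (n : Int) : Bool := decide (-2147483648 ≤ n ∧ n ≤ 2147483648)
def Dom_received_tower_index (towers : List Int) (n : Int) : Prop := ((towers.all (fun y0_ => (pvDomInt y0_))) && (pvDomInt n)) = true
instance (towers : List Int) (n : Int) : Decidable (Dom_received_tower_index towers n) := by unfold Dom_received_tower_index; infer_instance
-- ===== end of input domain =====

-- B replaces A's right-to-left destructive scan (which empties `towers`) by the standard
-- left-to-right monotonic-decreasing stack, non-mutating; equivalence is about the RETURN
-- value only (A empties its input list, B does not).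


-- ===== PORT A =====
-- Python's list-end stack is represented with the top at the head (exact as a stack ADT).
-- the inner `while towers and stack and towers[-1] >= stack[-1][1]` loop: `towers` is not
-- mutated inside it, so its non-emptiness (given by `v`) is checked once.
def aResolve (i : Nat) (v : Int) (stack : List (Nat × Int)) (results : List Int) :
    List (Nat × Int) × List Int :=
  match stack with
  | [] => ([], results)
  | (idx, h) :: rest =>
    if h ≤ v then aResolve i v rest (results.set idx (i : Int))
    else ((idx, h) :: rest, results)

-- `for i in range(len(towers)-1, -1, -1)` with `towers.pop()`: fuel k = i+1 = len(towers)
def aLoop : Nat → List Int → List (Nat × Int) → List Int → List Int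
  | 0, _, _, results => results
  | k+1, towers, stack, results =>
    let x := (towers.getLast?).getD 0          -- towers.pop() (towers has length k+1 here)
    let towers' := towers.dropLast
    let stack' := (k, x) :: stack              -- stack.append((i, towers.pop()))
    match towers'.getLast? with                -- `towers and … towers[-1]`
    | none => aLoop k towers' stack' results
    | some v =>
      let p := aResolve k v stack' results
      aLoop k towers' p.1 p.2

def received_tower_index (towers : List Int) (n : Int) : List Int :=
  aLoop towers.length towers [] (List.replicate n.toNat 0)

-- ===== PORT B =====
-- `while stack and stack[-1][1] < h: stack.pop()`  (top at head)
def bPop (h : Int) (stack : List (Nat × Int)) : List (Nat × Int) :=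
  match stack with
  | [] => []
  | (j, hj) :: rest => if hj < h then bPop h rest else (j, hj) :: rest

def bLoop : Nat → List Int → List (Nat × Int) → List Int → List Int
  | _, [], _, results => results
  | i, h :: rest, stack, results =>
    let stack' := bPop h stack
    let results' := match stack' with          -- if stack: results[i] = stack[-1][0]
      | (j, _) :: _ => results.set i (j : Int)
      | [] => results
    bLoop (i+1) rest ((i+1, h) :: stack') results'

def received_tower_index_alt (towers : List Int) (n : Int) : List Int :=
  bLoop 0 towers [] (List.replicate n.toNat 0)

-- ===== PRECONDITION & SPEC =====
-- Pre_ excludes exactly the inputs on which Python A raises IndexError: some tower at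
-- position i ≥ n has a receiver (a tower j < i at least as high), so `results[i]` is
-- written out of range of the length-n result list.  A returns normally iff Pre_ holds.
def Pre_received_tower_index (towers : List Int) (n : Int) : Prop :=
  ∀ i, i < towers.length → n ≤ (i : Int) →
    ∀ j, j < i → towers.getD j 0 < towers.getD i 0
instance (towers : List Int) (n : Int) : Decidable (Pre_received_tower_index towers n) := by
  unfold Pre_received_tower_index; infer_instance

def pvWitness_received_tower_index : List Int × Int := ([3, 5, 2], 3)

def Spec_received_tower_index (towers : List Int) (n : Int) (out : List Int) : Prop := out = received_tower_index_alt towers n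
instance (towers : List Int) (n : Int) (out : List Int) : Decidable (Spec_received_tower_index towers n out) := by unfold Spec_received_tower_index; infer_instance

-- ===== CLAIM (what is proved, stated in full; the proofs are below) =====
def Claim_equal_received_tower_index : Prop := ∀ (towers : List Int) (n : Int), Dom_received_tower_index towers n → Pre_received_tower_index towers n → Spec_received_tower_index towers n (received_tower_index towers n)

-- ===== LEMMAS AND PROOFS =====

-- The common specification: result entry p is 1 + (greatest j < p with T[j] ≥ T[p]), or 0.
-- `srch T hp p` searches downward from p-1 for the first j with hp ≤ T[j].
def srch (T : List Int) (hp : Int) : Nat → Int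
  | 0 => 0
  | j+1 => if hp ≤ T.getD j 0 then ((j : Int) + 1) else srch T hp j

def ERes (T : List Int) (p : Nat) : Int :=
  if p < T.length then srch T (T.getD p 0) p else 0

lemma srch_skip (T : List Int) (hp : Int) (a b : Nat) (hab : a ≤ b)
    (h : ∀ j, a ≤ j → j < b → T.getD j 0 < hp) : srch T hp b = srch T hp a := by
  induction b with
  | zero => have : a = 0 := by omega
            subst this; rfl
  | succ b ih =>
    rcases Nat.eq_or_lt_of_le hab with rfl | hlt
    · rfl
    · have hb : a ≤ b := by omega
      have : T.getD b 0 < hp := h b hb (by omega)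
      simp only [srch, not_le.2 this]
      exact ih hb (fun j hj hjb => h j hj (by omega))

lemma map_range_set (f : Nat → Int) (N m : Nat) (x : Int) :
    ((List.range N).map f).set m x
      = (List.range N).map (fun p => if p = m then x else f p) := by
  apply List.ext_getElem
  · simp
  · intro p h1 h2
    simp only [List.getElem_set, List.getElem_map, List.getElem_range]
    by_cases h : m = p
    · subst h; simp
    · simp [h, Ne.symm h]

-- ---------- B side ----------

-- stack index list of B at time i: the j < i (descending) not yet shadowed by a
-- strictly higher later tower.
def PiL (T : List Int) (i : Nat) : List Nat :=
  ((List.range i).reverse).filter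
    (fun j => decide (∀ m, m < i → j < m → T.getD m 0 ≤ T.getD j 0))

lemma PiL_succ (T : List Int) (i : Nat) :
    PiL T (i+1) = i :: (PiL T i).filter (fun j => decide (T.getD i 0 ≤ T.getD j 0)) := by
  unfold PiL
  rw [List.range_succ, List.reverse_append]
  simp only [List.reverse_singleton, List.singleton_append, List.filter_cons]
  have h1 : (decide (∀ m, m < i + 1 → i < m → T.getD m 0 ≤ T.getD i 0)) = true := by
    rw [decide_eq_true_eq]; intro m h1 h2; omega
  rw [h1, if_pos rfl, List.filter_filter]
  congr 1
  apply List.filter_congr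
  intro j hj
  have hji : j < i := by simpa using hj
  by_cases hc : T.getD i 0 ≤ T.getD j 0
  · simp only [hc, decide_true, Bool.true_and]
    rw [decide_eq_decide]
    constructor
    · intro h m hm hjm; exact h m (by omega) hjm
    · intro h m hm hjm
      rcases Nat.lt_succ_iff_lt_or_eq.mp hm with hm' | rfl
      · exact h m hm' hjm
      · exact hc
  · simp only [hc, decide_false, Bool.false_and, decide_eq_false_iff_not]
    intro hall; exact hc (hall i (by omega) hji)

lemma PiL_mem (T : List Int) (i j : Nat) :
    j ∈ PiL T i ↔ j < i ∧ ∀ m, m < i → j < m → T.getD m 0 ≤ T.getD j 0 := by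
  unfold PiL
  simp [List.mem_filter, List.mem_reverse, List.mem_range]

lemma PiL_desc (T : List Int) (i : Nat) : (PiL T i).Pairwise (· > ·) := by
  unfold PiL
  apply List.Pairwise.filter
  rw [List.pairwise_reverse]
  simpa using List.pairwise_lt_range

lemma PiL_cover (T : List Int) : ∀ d i m, m < i → i - m ≤ d →
    ∃ j ∈ PiL T i, m ≤ j ∧ T.getD m 0 ≤ T.getD j 0 := by
  intro d
  induction d with
  | zero => intro i m h1 h2; omega
  | succ d ih =>
    intro i m h1 h2
    by_cases hm : ∀ m', m' < i → m < m' → T.getD m' 0 ≤ T.getD m 0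
    · exact ⟨m, (PiL_mem T i m).2 ⟨h1, hm⟩, le_refl m, le_refl _⟩
    · push Not at hm
      obtain ⟨m', hm'i, hmm', hgt⟩ := hm
      obtain ⟨j, hjP, hj1, hj2⟩ := ih i m' hm'i (by omega)
      exact ⟨j, hjP, by omega, le_trans (le_of_lt hgt) hj2⟩

lemma bPop_filter (h : Int) (s : List (Nat × Int))
    (hs : s.Pairwise (fun a b => a.2 ≤ b.2)) :
    bPop h s = s.filter (fun e => decide (h ≤ e.2)) := by
  induction s with
  | nil => rfl
  | cons e rest ih =>
    obtain ⟨j, hj⟩ := e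
    rw [List.pairwise_cons] at hs
    by_cases hc : hj < h
    · simp only [bPop, if_pos hc, List.filter_cons, decide_eq_true_eq]
      rw [if_neg (by simp; omega)]
      exact ih hs.2
    · simp only [bPop, if_neg hc, List.filter_cons]
      rw [if_pos (by simp; omega)]
      congr 1
      rw [eq_comm]
      apply List.filter_eq_self.2
      intro e he
      have := hs.1 e he
      simp only [decide_eq_true_eq]
      omega

-- the mapped B stack is height-sorted (weakly increasing from the head)
lemma PiL_sorted (T : List Int) (i : Nat) :
    ((PiL T i).map (fun j => (j+1, T.getD j 0))).Pairwise (fun a b => a.2 ≤ b.2) := by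
  rw [List.pairwise_map]
  refine List.Pairwise.imp_of_mem ?_ (PiL_desc T i)
  intro a b ha hb hab
  exact ((PiL_mem T i b).1 hb).2 a ((PiL_mem T i a).1 ha).1 hab


lemma E_filter_nil (T : List Int) (i : Nat)
    (h : (PiL T i).filter (fun j => decide (T.getD i 0 ≤ T.getD j 0)) = []) :
    srch T (T.getD i 0) i = 0 := by
  have hall : ∀ m, 0 ≤ m → m < i → T.getD m 0 < T.getD i 0 := by
    intro m _ hmi
    by_contra hc
    push Not at hc
    obtain ⟨j, hjP, _, hj2⟩ := PiL_cover T i i m hmi (by omega)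
    have : j ∈ (PiL T i).filter (fun j => decide (T.getD i 0 ≤ T.getD j 0)) :=
      List.mem_filter.2 ⟨hjP, by simpa using le_trans hc hj2⟩
    rw [h] at this
    simp at this
  rw [srch_skip T _ 0 i (Nat.zero_le i) hall]
  rfl

lemma E_filter_cons (T : List Int) (i j : Nat) (rest : List Nat)
    (h : (PiL T i).filter (fun j => decide (T.getD i 0 ≤ T.getD j 0)) = j :: rest) :
    srch T (T.getD i 0) i = (j : Int) + 1 := by
  have hjF : j ∈ (PiL T i).filter (fun j => decide (T.getD i 0 ≤ T.getD j 0)) := by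
    rw [h]; exact List.mem_cons_self
  have hjP : j ∈ PiL T i ∧ T.getD i 0 ≤ T.getD j 0 := by
    simpa [List.mem_filter] using hjF
  have hji : j < i := ((PiL_mem T i j).1 hjP.1).1
  have hmid : ∀ m, j+1 ≤ m → m < i → T.getD m 0 < T.getD i 0 := by
    intro m hm1 hm2
    by_contra hc
    push Not at hc
    obtain ⟨j', hj'P, hj'1, hj'2⟩ := PiL_cover T i i m hm2 (by omega)
    have hj'F : j' ∈ (PiL T i).filter (fun j => decide (T.getD i 0 ≤ T.getD j 0)) :=
      List.mem_filter.2 ⟨hj'P, by simpa using le_trans hc hj'2⟩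
    have hdesc : (j :: rest).Pairwise (· > ·) := h ▸ (PiL_desc T i).filter _
    rw [h] at hj'F
    rcases List.mem_cons.1 hj'F with rfl | hmem
    · omega
    · have := (List.pairwise_cons.1 hdesc).1 j' hmem
      omega
  rw [srch_skip T _ (j+1) i (by omega) hmid]
  simp only [srch]
  rw [if_pos hjP.2]

lemma bLoop_spec (T : List Int) (N : Nat) :
    ∀ (rest : List Int) (i : Nat), i ≤ T.length → rest = T.drop i →
    bLoop i rest ((PiL T i).map (fun j => (j+1, T.getD j 0)))
      ((List.range N).map (fun p => if p < i then ERes T p else 0))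
    = (List.range N).map (ERes T) := by
  intro rest
  induction rest with
  | nil =>
    intro i hi hd
    have hiL : i = T.length := by
      have := List.drop_eq_nil_iff.1 hd.symm
      omega
    subst hiL
    simp only [bLoop]
    apply List.map_congr_left
    intro p hp
    by_cases h : p < T.length
    · simp [h]
    · simp [h, ERes]
  | cons h rest ih =>
    intro i hi hd
    have hiL : i < T.length := by
      by_contra hc
      push Not at hc
      rw [List.drop_eq_nil_of_le hc] at hd
      exact List.cons_ne_nil _ _ hd
    have hsplit : T[i] :: T.drop (i+1) = T.drop i := List.getElem_cons_drop ..
    rw [← hd] at hsplit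
    have hh : h = T.getD i 0 := by
      have := (List.cons_eq_cons.1 hsplit).1
      rw [← this, List.getD_eq_getElem]
    have hrest : rest = T.drop (i+1) := ((List.cons_eq_cons.1 hsplit).2).symm
    simp only [bLoop]
    have hsorted := PiL_sorted T i
    rw [hh, bPop_filter _ _ hsorted, List.filter_map]
    have hfe : ((PiL T i).filter
        ((fun e => decide (T.getD i 0 ≤ e.2)) ∘ fun j => (j + 1, T.getD j 0)))
        = (PiL T i).filter (fun j => decide (T.getD i 0 ≤ T.getD j 0)) := by
      apply List.filter_congr
      intro j _
      rfl
    rw [hfe]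
    rcases hF : (PiL T i).filter (fun j => decide (T.getD i 0 ≤ T.getD j 0)) with _ | ⟨j, tl⟩
    · simp only [List.map_nil]
      have hstk : ((i + 1, T.getD i 0) : Nat × Int) :: [] =
          (PiL T (i+1)).map (fun j => (j+1, T.getD j 0)) := by
        rw [PiL_succ, hF]
        rfl
      have hres : ((List.range N).map (fun p => if p < i then ERes T p else 0))
          = (List.range N).map (fun p => if p < i + 1 then ERes T p else 0) := by
        apply List.map_congr_left
        intro p _
        by_cases hpi : p = i
        · subst hpi
          rw [if_neg (by omega), if_pos (by omega)]
          unfold ERes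
          rw [if_pos hiL, E_filter_nil T p hF]
        · by_cases h1 : p < i
          · rw [if_pos h1, if_pos (by omega)]
          · rw [if_neg h1, if_neg (by omega)]
      rw [hstk, hres]
      exact ih (i+1) (by omega) hrest
    · simp only [List.map_cons]
      have hstk : ((i + 1, T.getD i 0) : Nat × Int) ::
            (j + 1, T.getD j 0) :: tl.map (fun j => (j+1, T.getD j 0))
          = (PiL T (i+1)).map (fun j => (j+1, T.getD j 0)) := by
        rw [PiL_succ, hF]
        rfl
      have hres : (((List.range N).map (fun p => if p < i then ERes T p else 0)).set i
            ((↑(j + 1) : Int)))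
          = (List.range N).map (fun p => if p < i + 1 then ERes T p else 0) := by
        rw [map_range_set]
        apply List.map_congr_left
        intro p _
        by_cases hpi : p = i
        · subst hpi
          rw [if_pos rfl, if_pos (by omega)]
          unfold ERes
          rw [if_pos hiL, E_filter_cons T p j tl hF]
          push_cast
          ring
        · rw [if_neg hpi]
          by_cases h1 : p < i
          · rw [if_pos h1, if_pos (by omega)]
          · rw [if_neg h1, if_neg (by omega)]
      rw [hstk, hres]
      exact ih (i+1) (by omega) hrest

lemma alt_eq (T : List Int) (n : Int) :
    received_tower_index_alt T n = (List.range n.toNat).map (ERes T) := by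
  unfold received_tower_index_alt
  have h0 : (List.replicate n.toNat (0:Int))
      = (List.range n.toNat).map (fun p => if p < 0 then ERes T p else 0) := by
    rw [show (fun p => if p < 0 then ERes T p else (0:Int)) = (fun _ => (0:Int)) from by
      funext p; simp]
    rw [List.map_const', List.length_range]
  rw [h0]
  have := bLoop_spec T n.toNat T 0 (Nat.zero_le _) (by simp)
  simpa [PiL] using this


def SkL (T : List Int) (k : Nat) : List Nat :=
  (List.range' k (T.length - k)).filter
    (fun m => decide (∀ j, j < m → k-1 ≤ j → T.getD j 0 < T.getD m 0))

lemma SkL_mem (T : List Int) (k m : Nat) (hk : k ≤ T.length) :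
    m ∈ SkL T k ↔ k ≤ m ∧ m < T.length ∧
      ∀ j, j < m → k-1 ≤ j → T.getD j 0 < T.getD m 0 := by
  unfold SkL
  rw [List.mem_filter, List.mem_range'_1]
  simp only [decide_eq_true_eq]
  constructor
  · rintro ⟨⟨h1, h2⟩, h3⟩
    exact ⟨h1, by omega, h3⟩
  · rintro ⟨h1, h2, h3⟩
    exact ⟨⟨h1, by omega⟩, h3⟩

lemma SkL_asc (T : List Int) (k : Nat) : (SkL T k).Pairwise (· < ·) := by
  unfold SkL
  exact List.Pairwise.filter _ (List.pairwise_lt_range' ..)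

lemma stackA_sorted (T : List Int) (k : Nat) (hk : k + 1 ≤ T.length) :
    (((k :: SkL T (k+1)).map (fun m => (m, T.getD m 0))).Pairwise
      (fun a b => a.2 ≤ b.2)) := by
  rw [List.map_cons, List.pairwise_cons]
  constructor
  · intro b hb
    obtain ⟨m, hm, rfl⟩ := List.mem_map.1 hb
    obtain ⟨h1, h2, h3⟩ := (SkL_mem T (k+1) m hk).1 hm
    exact le_of_lt (h3 k (by omega) (by omega))
  · rw [List.pairwise_map]
    refine List.Pairwise.imp_of_mem ?_ (SkL_asc T (k+1))
    intro a b ha hb hab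
    obtain ⟨h1, h2, h3⟩ := (SkL_mem T (k+1) b hk).1 hb
    obtain ⟨ha1, _, _⟩ := (SkL_mem T (k+1) a hk).1 ha
    exact le_of_lt (h3 a hab (by omega))

lemma aResolve_spec (T : List Int) (k : Nat) (v : Int) (N : Nat) :
    ∀ (Ms : List Nat) (g : Nat → Int),
      ((Ms.map (fun m => (m, T.getD m 0))).Pairwise (fun a b => a.2 ≤ b.2)) →
      aResolve k v (Ms.map (fun m => (m, T.getD m 0))) ((List.range N).map g)
        = ((Ms.filter (fun m => decide (v < T.getD m 0))).map (fun m => (m, T.getD m 0)),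
           (List.range N).map (fun p => if p ∈ Ms ∧ T.getD p 0 ≤ v then (k:Int) else g p)) := by
  intro Ms
  induction Ms with
  | nil =>
    intro g _
    simp only [List.map_nil, aResolve, List.filter_nil, Prod.mk.injEq, true_and]
    apply List.map_congr_left
    intro p _
    simp
  | cons m Ms ih =>
    intro g hp
    rw [List.map_cons] at hp ⊢
    rw [List.pairwise_cons] at hp
    by_cases hc : T.getD m 0 ≤ v
    · have hstep : aResolve k v ((m, T.getD m 0) :: Ms.map (fun m => (m, T.getD m 0)))
          ((List.range N).map g)
          = aResolve k v (Ms.map (fun m => (m, T.getD m 0)))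
              (((List.range N).map g).set m (k:Int)) := by
        simp only [aResolve, if_pos hc]
      rw [hstep, map_range_set, ih _ hp.2]
      simp only [Prod.mk.injEq]
      refine ⟨?_, ?_⟩
      · have hnc : ¬ (v < T.getD m 0) := not_lt.2 hc
        rw [List.filter_cons, if_neg (by simpa using hnc)]
      · apply List.map_congr_left
        intro p _
        by_cases hpm : p = m
        · have hco : (p ∈ m :: Ms ∧ T.getD p 0 ≤ v) :=
            ⟨by rw [hpm]; exact List.mem_cons_self, by rw [hpm]; exact hc⟩
          rw [if_pos hco]
          split_ifs <;> rfl
        · simp only [List.mem_cons, hpm, false_or]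
          split_ifs <;> first | rfl | (exfalso; tauto)
    · have hnc : v < T.getD m 0 := not_le.1 hc
      have hstep : aResolve k v ((m, T.getD m 0) :: Ms.map (fun m => (m, T.getD m 0)))
          ((List.range N).map g)
          = ((m, T.getD m 0) :: Ms.map (fun m => (m, T.getD m 0)), (List.range N).map g) := by
        simp only [aResolve, if_neg hc]
      rw [hstep]
      simp only [Prod.mk.injEq]
      refine ⟨?_, ?_⟩
      · rw [List.filter_cons, if_pos (by simpa using hnc), List.map_cons]
        congr 1
        rw [List.filter_eq_self.2, ]
        intro a ha
        have : (a, T.getD a 0) ∈ Ms.map (fun m => (m, T.getD m 0)) :=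
          List.mem_map.2 ⟨a, ha, rfl⟩
        have := hp.1 _ this
        simp only [decide_eq_true_eq]
        omega
      · apply List.map_congr_left
        intro p _
        rw [if_neg]
        rintro ⟨hmem, hle⟩
        rcases List.mem_cons.1 hmem with rfl | hmem'
        · omega
        · have : (p, T.getD p 0) ∈ Ms.map (fun m => (m, T.getD m 0)) :=
            List.mem_map.2 ⟨p, hmem', rfl⟩
          have := hp.1 _ this
          simp only at this
          omega

lemma filter_cons_of_pos {p : Nat → Bool} (k : Nat) (l : List Nat) (h : p k = true) :
    List.filter p (k :: l) = k :: List.filter p l := by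
  rw [List.filter_cons, if_pos h]

lemma SkL_cons (T : List Int) (k : Nat) (hk : 1 ≤ k) (hkL : k < T.length) :
    SkL T k = (k :: SkL T (k+1)).filter (fun m => decide (T.getD (k-1) 0 < T.getD m 0)) := by
  unfold SkL
  have hr : List.range' k (T.length - k) = k :: List.range' (k+1) (T.length - (k+1)) := by
    rw [show T.length - k = (T.length - (k+1)) + 1 from by omega, List.range'_succ]
  rw [hr, ← filter_cons_of_pos k _ (by
    rw [decide_eq_true_eq]
    intro j h1 h2
    omega), List.filter_filter]
  apply List.filter_congr
  intro m hm
  have hmk : k ≤ m := by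
    rcases List.mem_cons.1 hm with rfl | hm'
    · omega
    · have := (List.mem_range'_1.1 hm').1
      omega
  by_cases hv : T.getD (k-1) 0 < T.getD m 0
  · simp only [hv, decide_true, Bool.true_and]
    rw [decide_eq_decide]
    constructor
    · intro h j hj1 hj2
      exact h j hj1 (by omega)
    · intro h j hj1 hj2
      by_cases hj : k ≤ j
      · exact h j hj1 (by omega)
      · have : j = k - 1 := by omega
        subst this
        exact hv
  · simp only [hv, decide_false, Bool.false_and, decide_eq_false_iff_not]
    intro hall
    exact hv (hall (k-1) (by omega) (by omega))

lemma ERes_zero_of (T : List Int) (p : Nat)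
    (h : ∀ j, j < p → T.getD j 0 < T.getD p 0) : ERes T p = 0 := by
  unfold ERes
  split_ifs with hp
  · rw [srch_skip T _ 0 p (Nat.zero_le _) (fun j _ hj => h j hj)]
    rfl
  · rfl

lemma ERes_eq_k (T : List Int) (p k : Nat) (hk : 1 ≤ k) (hkp : k ≤ p) (hpL : p < T.length)
    (hmid : ∀ j, k ≤ j → j < p → T.getD j 0 < T.getD p 0)
    (hle : T.getD p 0 ≤ T.getD (k-1) 0) : ERes T p = (k : Int) := by
  unfold ERes
  rw [if_pos hpL, srch_skip T _ k p hkp (fun j hj1 hj2 => hmid j hj1 hj2)]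
  rw [show k = (k-1)+1 from by omega]
  simp only [srch]
  rw [if_pos hle]
  push_cast
  omega

lemma aLoop_spec (T : List Int) (N : Nat) :
    ∀ k, k ≤ T.length →
    aLoop k (T.take k) ((SkL T k).map (fun m => (m, T.getD m 0)))
      ((List.range N).map (fun p =>
        if k ≤ p ∧ p < T.length ∧ p ∉ SkL T k then ERes T p else 0))
    = (List.range N).map (ERes T) := by
  intro k
  induction k with
  | zero =>
    intro _
    simp only [aLoop]
    apply List.map_congr_left
    intro p _
    by_cases hpL : p < T.length
    · by_cases hs : p ∈ SkL T 0
      · rw [if_neg (by tauto)]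
        obtain ⟨_, _, h3⟩ := (SkL_mem T 0 p (Nat.zero_le _)).1 hs
        rw [ERes_zero_of T p (fun j hj => h3 j hj (by omega))]
      · rw [if_pos ⟨Nat.zero_le _, hpL, hs⟩]
    · rw [if_neg (by tauto)]
      unfold ERes
      rw [if_neg hpL]
  | succ k ih =>
    intro hk1
    have hkL : k < T.length := by omega
    have htake : T.take (k+1) = T.take k ++ [T.getD k 0] := by
      rw [List.take_add_one, List.getElem?_eq_getElem hkL,
        List.getD_eq_getElem T 0 hkL]
      rfl
    rw [htake]
    simp only [aLoop, List.getLast?_concat, List.dropLast_concat, Option.getD_some]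
    rcases Nat.eq_zero_or_pos k with rfl | hkpos
    · -- first (and last) iteration: towers' = [] — no resolve
      simp only [List.take_zero, List.getLast?_nil, aLoop]
      apply List.map_congr_left
      intro p _
      by_cases hpL : p < T.length
      · by_cases hs : p ∈ SkL T 1
        · rw [if_neg (by tauto)]
          obtain ⟨_, _, h3⟩ := (SkL_mem T 1 p (by omega)).1 hs
          rw [ERes_zero_of T p (fun j hj => h3 j hj (by omega))]
        · by_cases hp0 : p = 0
          · subst hp0
            rw [if_neg (by omega)]
            rw [ERes_zero_of T 0 (fun j hj => by omega)]
          · rw [if_pos ⟨by omega, hpL, hs⟩]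
      · rw [if_neg (by tauto)]
        unfold ERes
        rw [if_neg hpL]
    · -- k ≥ 1: resolve with v = T[k-1]
      have htk : (T.take k).getLast? = some (T.getD (k-1) 0) := by
        have e1 : T.take k = T.take (k-1) ++ [T.getD (k-1) 0] := by
          conv_lhs => rw [show k = (k-1)+1 from by omega]
          rw [List.take_add_one, List.getElem?_eq_getElem (show k-1 < T.length by omega),
            List.getD_eq_getElem T 0 (show k-1 < T.length by omega)]
          rfl
        rw [e1, List.getLast?_concat]
      simp only [htk]
      have hstack : ((k, T.getD k 0) :: (SkL T (k+1)).map (fun m => (m, T.getD m 0)))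
          = (k :: SkL T (k+1)).map (fun m => (m, T.getD m 0)) := by
        rw [List.map_cons]
      rw [hstack, aResolve_spec T k (T.getD (k-1) 0) N _ _ (stackA_sorted T k hk1)]
      have hSk : (k :: SkL T (k+1)).filter (fun m => decide (T.getD (k-1) 0 < T.getD m 0))
          = SkL T k := (SkL_cons T k hkpos hkL).symm
      rw [hSk]
      have hres : (List.range N).map (fun p =>
            if p ∈ k :: SkL T (k+1) ∧ T.getD p 0 ≤ T.getD (k-1) 0 then (k:Int)
            else if k+1 ≤ p ∧ p < T.length ∧ p ∉ SkL T (k+1) then ERes T p else 0)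
          = (List.range N).map (fun p =>
            if k ≤ p ∧ p < T.length ∧ p ∉ SkL T k then ERes T p else 0) := by
        apply List.map_congr_left
        intro p _
        by_cases hpop : p ∈ k :: SkL T (k+1) ∧ T.getD p 0 ≤ T.getD (k-1) 0
        · rw [if_pos hpop]
          obtain ⟨hmem, hle⟩ := hpop
          have hkp : k ≤ p := by
            rcases List.mem_cons.1 hmem with rfl | hm'
            · omega
            · have := ((SkL_mem T (k+1) p hk1).1 hm').1
              omega
          have hpL : p < T.length := by
            rcases List.mem_cons.1 hmem with rfl | hm'
            · omega
            · exact ((SkL_mem T (k+1) p hk1).1 hm').2.1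
          have hmid : ∀ j, k ≤ j → j < p → T.getD j 0 < T.getD p 0 := by
            rcases List.mem_cons.1 hmem with rfl | hm'
            · intro j h1 h2
              omega
            · intro j h1 h2
              exact ((SkL_mem T (k+1) p hk1).1 hm').2.2 j h2 (by omega)
          have hnotin : p ∉ SkL T k := by
            intro hin
            rw [SkL_cons T k hkpos hkL, List.mem_filter] at hin
            have := hin.2
            simp only [decide_eq_true_eq] at this
            omega
          rw [if_pos ⟨hkp, hpL, hnotin⟩]
          exact (ERes_eq_k T p k hkpos hkp hpL hmid hle).symm
        · rw [if_neg hpop]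
          by_cases hplt : p < k
          · rw [if_neg (by omega), if_neg (by omega)]
          · by_cases hpk : p = k
            · have hv : T.getD (k-1) 0 < T.getD p 0 := by
                by_contra hcon
                exact hpop ⟨by rw [hpk]; exact List.mem_cons_self, by omega⟩
              have hin : p ∈ SkL T k := by
                rw [hpk, SkL_cons T k hkpos hkL, List.mem_filter]
                exact ⟨List.mem_cons_self, by rw [decide_eq_true_eq]; exact hpk ▸ hv⟩
              rw [if_neg (by rintro ⟨h1, -, -⟩; omega),
                if_neg (by rintro ⟨-, -, hq⟩; exact hq hin)]
            · -- p ≥ k+1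
              have hpk1 : k + 1 ≤ p := by omega
              by_cases hpL : p < T.length
              · by_cases hs : p ∈ SkL T (k+1)
                · have hv : T.getD (k-1) 0 < T.getD p 0 := by
                    by_contra hcon
                    exact hpop ⟨List.mem_cons.2 (Or.inr hs), by omega⟩
                  have hin : p ∈ SkL T k := by
                    rw [SkL_cons T k hkpos hkL, List.mem_filter]
                    exact ⟨List.mem_cons.2 (Or.inr hs), by simpa using hv⟩
                  rw [if_neg (by tauto), if_neg (by tauto)]
                · have hnin : p ∉ SkL T k := by
                    intro hin
                    rw [SkL_cons T k hkpos hkL, List.mem_filter] at hin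
                    rcases List.mem_cons.1 hin.1 with rfl | h'
                    · omega
                    · exact hs h'
                  rw [if_pos ⟨hpk1, hpL, hs⟩, if_pos ⟨by omega, hpL, hnin⟩]
              · rw [if_neg (by tauto), if_neg (by tauto)]
      rw [hres]
      exact ih (by omega)

lemma a_eq (T : List Int) (n : Int) :
    received_tower_index T n = (List.range n.toNat).map (ERes T) := by
  unfold received_tower_index
  have hS : SkL T T.length = [] := by
    unfold SkL
    rw [Nat.sub_self]
    rfl
  have h0 : (List.replicate n.toNat (0:Int))
      = (List.range n.toNat).map (fun p =>
          if T.length ≤ p ∧ p < T.length ∧ p ∉ ([] : List Nat) then ERes T p else 0) := by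
    rw [show (fun p => if T.length ≤ p ∧ p < T.length ∧ p ∉ ([] : List Nat)
        then ERes T p else (0:Int)) = (fun _ => (0:Int)) from by
      funext p
      rw [if_neg (by rintro ⟨a, b, -⟩; omega)]]
    rw [List.map_const', List.length_range]
  have h2 := aLoop_spec T n.toNat T.length (le_refl _)
  rw [List.take_length, hS] at h2
  simp only [List.map_nil] at h2
  rw [h0]
  exact h2



-- ===== VERDICT (by name: the statement is the Claim_ definition above) =====
theorem received_tower_index_spec : Claim_equal_received_tower_index := by
  unfold Claim_equal_received_tower_index
  intro towers n _ _
  unfold Spec_received_tower_index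
  rw [alt_eq, a_eq]
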